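-- pv_equiv track=rewrite | github.com/Joacim-S/AdventOfCode23 | days/d11_1.py | add_cols
-- ===== SOURCE A (Python) =====
-- def add_cols(galaxies):
--     galaxies.sort()
--     offset = 0
--     galaxies_expanded = []
--     for i, g in enumerate(galaxies):
--         galaxies_expanded.append((g[0] + offset, g[1]))
--
--         if i == len(galaxies)-1:
--             return galaxies_expanded
--
--         col_difference = galaxies[i+1][0] - g[0]
--         if col_difference > 1:
--             offset += col_difference - 1
-- ===== SOURCE B (Python) =====
-- def add_cols(galaxies):
--     # Closed form per galaxy: expanded column = 2*c - min_col - rank(c), where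
--     # rank(c) = number of distinct galaxy columns strictly below c. No gap scan,
--     # no running offset. (Like A, sorts `galaxies` in place; returns [] rather
--     # than A's None for empty input.)
--     galaxies.sort()
--     if not galaxies:
--         return []
--     cols = sorted({g[0] for g in galaxies})
--     rank = {c: i for i, c in enumerate(cols)}
--     c0 = cols[0]
--     return [(2 * c - c0 - rank[c], y) for c, y in galaxies]
-- ===== Notes on version B (the rewrite author's own statement) =====
-- stated objective: alternative
-- what changed: A's single loop that accumulates a running offset from adjacent column gaps and emits while scanning is replaced by a per-galaxy closed form: expanded column = 2*c - min_col - rank(c), where rank(c) (distinct columns below c) comes from a dict built over the sorted distinct columns; there is no gap computation or offset accumulation at all.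
-- outside the precondition, e.g. on add_cols([]): A returns None, B returns []
import Mathlib
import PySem

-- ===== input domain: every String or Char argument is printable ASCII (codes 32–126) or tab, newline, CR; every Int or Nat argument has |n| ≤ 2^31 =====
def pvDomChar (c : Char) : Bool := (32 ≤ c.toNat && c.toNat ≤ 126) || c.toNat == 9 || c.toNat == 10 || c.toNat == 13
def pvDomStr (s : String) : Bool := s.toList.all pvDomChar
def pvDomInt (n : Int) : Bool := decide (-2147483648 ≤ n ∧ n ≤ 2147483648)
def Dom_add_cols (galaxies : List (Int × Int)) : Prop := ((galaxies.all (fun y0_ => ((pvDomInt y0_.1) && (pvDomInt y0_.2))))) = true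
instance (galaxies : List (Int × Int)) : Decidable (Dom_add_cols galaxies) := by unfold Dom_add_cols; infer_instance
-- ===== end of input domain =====

-- B replaces A's running-offset gap scan by a per-galaxy closed form
-- 2*c - min_col - rank(c) with a rank dict over the sorted distinct columns
-- (objective: alternative algorithm, same cost). Both versions sort the argument
-- in place in Python; the equivalence proved is about the return value
-- (B performs the same sort mutation).

-- ===== PORT A =====
-- A's for-loop over the sorted list: emits (g[0]+offset, g[1]), returns at the last index,
-- otherwise looks at galaxies[i+1][0] - g[0] and bumps offset when the gap exceeds 1.
def addColsLoop : Int → List (Int × Int) → List (Int × Int)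
  | _, [] => []                      -- loop body never runs: Python A returns None here (excluded by Pre_)
  | offset, [g] => [(g.1 + offset, g.2)]   -- i == len-1: append then return
  | offset, g :: h :: t =>
      (g.1 + offset, g.2) ::
        addColsLoop (if h.1 - g.1 > 1 then offset + (h.1 - g.1 - 1) else offset) (h :: t)

def add_cols (galaxies : List (Int × Int)) : List (Int × Int) :=
  addColsLoop 0 (PySem.List.sorted2 galaxies Prod.fst Prod.snd)   -- galaxies.sort(): lexicographic tuple sort

-- ===== PORT B =====
def add_cols_alt (galaxies : List (Int × Int)) : List (Int × Int) :=
  let gs := PySem.List.sorted2 galaxies Prod.fst Prod.snd          -- galaxies.sort()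
  if gs = [] then []                                               -- if not galaxies: return []
  else
    let cols := PySem.List.sorted (PySem.Set.ofList (gs.map Prod.fst)) (fun x => x)  -- sorted({g[0] for g in galaxies})
    let rank := (PySem.List.enumerate cols).foldl (fun d p => d.insert p.2 p.1) PySem.Dict.empty
        -- {c: i for i, c in enumerate(cols)}
    let c0 := PySem.List.pyGetD cols 0 0                           -- cols[0]; cols nonempty here, never raises
    gs.map (fun g => (2 * g.1 - c0 - rank.getD g.1 0, g.2))
        -- rank[c]; every g.1 is a key of rank, so the lookup never raises KeyError

-- ===== PRECONDITION & SPEC =====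
-- Pre_ excludes only the empty list, on which A's loop never runs and A returns None
-- (not a list); B returns [] there — see claim.json "cites".
def Pre_add_cols (galaxies : List (Int × Int)) : Prop := galaxies ≠ []
instance (galaxies : List (Int × Int)) : Decidable (Pre_add_cols galaxies) := by unfold Pre_add_cols; infer_instance
def pvWitness_add_cols : (List (Int × Int)) := ([(0, 0), (3, 1)])

def Spec_add_cols (galaxies : List (Int × Int)) (out : List (Int × Int)) : Prop := out = add_cols_alt galaxies
instance (galaxies : List (Int × Int)) (out : List (Int × Int)) : Decidable (Spec_add_cols galaxies out) := by unfold Spec_add_cols; infer_instance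

-- ===== CLAIM (what is proved, stated in full; the proofs are below) =====
def Claim_equal_add_cols : Prop := ∀ (galaxies : List (Int × Int)), Dom_add_cols galaxies → Pre_add_cols galaxies → Spec_add_cols galaxies (add_cols galaxies)

-- ===== LEMMAS AND PROOFS =====

def Dlt (l : List Int) (c : Int) : Int :=
  ((PySem.List.dedup l).countP (fun x => decide (x < c)) : Int)

theorem dedup_cons_perm (a : Int) (l : List Int) :
    (PySem.List.dedup (a :: l)).Perm (if a ∈ l then PySem.List.dedup l else a :: PySem.List.dedup l) := by
  split_ifs with h
  · rw [List.perm_ext_iff_of_nodup (PySem.List.nodup_dedup _) (PySem.List.nodup_dedup _)]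
    intro x
    simp
    intro hx; subst hx; exact h
  · rw [List.perm_ext_iff_of_nodup (PySem.List.nodup_dedup _)]
    · intro x; simp
    · exact List.Nodup.cons (by simp [h]) (PySem.List.nodup_dedup _)

theorem Dlt_cons (a : Int) (l : List Int) (c : Int) :
    Dlt (a :: l) c = Dlt l c + (if a ∈ l then 0 else if a < c then 1 else 0) := by
  unfold Dlt
  rw [(dedup_cons_perm a l).countP_eq]
  by_cases h1 : a ∈ l
  · simp [h1]
  · by_cases h2 : a < c <;> simp [h1, h2]

theorem Dlt_nonneg_zero (l : List Int) (c : Int) (h : ∀ x ∈ l, c ≤ x) : Dlt l c = 0 := by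
  unfold Dlt
  rw [List.countP_eq_zero.mpr]
  · simp
  · intro x hx
    have hx' : x ∈ l := (PySem.List.mem_dedup (xs := l) (x := x)).mp hx
    have := h x hx'
    simpa using by omega

theorem loop_closed (rest : List (Int × Int)) (g : Int × Int) (o : Int)
    (hs : (g :: rest).Pairwise (fun a b => a.1 ≤ b.1)) :
    addColsLoop o (g :: rest)
      = (g :: rest).map (fun x => (x.1 + o + (x.1 - g.1) - Dlt ((g :: rest).map Prod.fst) x.1, x.2)) := by
  induction rest generalizing g o with
  | nil =>
    have h0 : Dlt ([g].map Prod.fst) g.1 = 0 :=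
      Dlt_nonneg_zero _ _ (by intro x hx; simp at hx; omega)
    simp only [addColsLoop, List.map_cons, List.map_nil] at h0 ⊢
    rw [h0]
    norm_num
  | cons h t ih =>
    have hgh : g.1 ≤ h.1 := (List.pairwise_cons.mp hs).1 h (by simp)
    have hs' : (h :: t).Pairwise (fun a b => a.1 ≤ b.1) := (List.pairwise_cons.mp hs).2
    have htail : ∀ x ∈ h :: t, h.1 ≤ x.1 := by
      intro x hx
      rcases List.mem_cons.mp hx with rfl | hx
      · exact le_refl _
      · exact (List.pairwise_cons.mp hs').1 x hx
    have hhead : Dlt ((g :: h :: t).map Prod.fst) g.1 = 0 := by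
      apply Dlt_nonneg_zero
      intro x hx
      rw [List.mem_map] at hx
      obtain ⟨p, hp, rfl⟩ := hx
      rcases List.mem_cons.mp hp with rfl | hp
      · exact le_refl _
      · exact le_trans hgh (htail p hp)
    rw [show addColsLoop o (g :: h :: t) = (g.1 + o, g.2) ::
        addColsLoop (if h.1 - g.1 > 1 then o + (h.1 - g.1 - 1) else o) (h :: t) from rfl]
    rw [ih h _ hs']
    rw [List.map_cons (l := h :: t)]
    congr 1
    · have : g.1 + o + (g.1 - g.1) - Dlt ((g :: h :: t).map Prod.fst) g.1 = g.1 + o := by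
        rw [hhead]; ring
      rw [this]
    · apply List.map_congr_left
      intro x hx
      have hxh : h.1 ≤ x.1 := htail x hx
      have hD : Dlt ((g :: h :: t).map Prod.fst) x.1
          = Dlt ((h :: t).map Prod.fst) x.1
            + (if g.1 ∈ (h :: t).map Prod.fst then 0 else if g.1 < x.1 then 1 else 0) := by
        simpa using Dlt_cons g.1 ((h :: t).map Prod.fst) x.1
      simp only [List.map_cons] at hD ⊢
      rw [hD]
      have hhmem : h.1 ∈ h.1 :: t.map Prod.fst := by simp
      by_cases hmem : g.1 ∈ h.1 :: List.map Prod.fst t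
      · have hge : h.1 ≤ g.1 := by
          rcases List.mem_cons.mp hmem with he | hm
          · omega
          · rw [List.mem_map] at hm
            obtain ⟨p, hp, he⟩ := hm
            have := htail p (List.mem_cons_of_mem _ hp)
            omega
        have : g.1 = h.1 := le_antisymm hgh hge
        rw [if_pos hmem, if_neg (show ¬(h.1 - g.1 > 1) by omega)]
        refine Prod.ext ?_ rfl
        simp only
        omega
      · have hlt : g.1 < h.1 := by
          rcases lt_or_eq_of_le hgh with hl | he
          · exact hl
          · exact absurd (he ▸ hhmem) hmem
        rw [if_neg hmem, if_pos (show g.1 < x.1 by omega)]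
        refine Prod.ext ?_ rfl
        simp only
        split_ifs <;> omega

theorem idx_countP (cols : List Int) (hs : cols.Pairwise (· < ·)) (k : Nat) (hk : k < cols.length) :
    cols.countP (fun x => decide (x < cols[k])) = k := by
  induction cols generalizing k with
  | nil => simp at hk
  | cons a rest ih =>
    have ha : ∀ x ∈ rest, a < x := (List.pairwise_cons.mp hs).1
    have hs' : rest.Pairwise (· < ·) := (List.pairwise_cons.mp hs).2
    cases k with
    | zero =>
      simp only [List.getElem_cons_zero, List.countP_cons]
      rw [List.countP_eq_zero.mpr]
      · simp
      · intro x hx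
        have := ha x hx
        simpa using by omega
    | succ j =>
      have hj : j < rest.length := by simpa using hk
      have hgetE : (a :: rest)[j+1]'hk = rest[j]'hj := by simp
      rw [List.countP_cons, hgetE]
      have hih := ih hs' j hj
      have hlt : a < rest[j]'hj := ha _ (List.getElem_mem hj)
      simp only [hlt, decide_true, if_true]
      omega

theorem rank_getD (cols : List Int) (hs : cols.Pairwise (· < ·)) (c : Int) (hc : c ∈ cols) :
    ((PySem.List.enumerate cols).foldl (fun d p => d.insert p.2 p.1) PySem.Dict.empty).getD c 0
      = (cols.countP (fun x => decide (x < c)) : Int) := by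
  have hnd : cols.Nodup := hs.nodup
  obtain ⟨k, hk, rfl⟩ := List.getElem_of_mem hc
  rw [idx_countP cols hs k hk]
  have hitems : ((PySem.List.enumerate cols).foldl (fun d p => d.insert p.2 p.1) PySem.Dict.empty).items
      = PySem.Dict.empty.items ++ (PySem.List.enumerate cols).map (fun p => (p.2, p.1)) := by
    apply PySem.Dict.items_foldl_insert_fresh
    · intro a ha; simp [PySem.Dict.contains_empty]
    · have : (PySem.List.enumerate cols).map (fun p => p.2) = cols := PySem.List.map_snd_enumerate cols 0
      rw [this]; exact hnd
  have hmem : ((cols[k] : Int), (k : Int)) ∈ ((PySem.List.enumerate cols).foldl (fun d p => d.insert p.2 p.1) PySem.Dict.empty).items := by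
    rw [hitems]
    simp only [List.mem_append, List.mem_map]
    right
    refine ⟨(k, cols[k]), ?_, rfl⟩
    rw [PySem.List.mem_enumerate_iff]
    exact ⟨k, hk, by simp⟩
  have hndk : ((PySem.List.enumerate cols).foldl (fun d p => d.insert p.2 p.1) PySem.Dict.empty).keys.Nodup := by
    apply PySem.Dict.nodup_keys_foldl_insert_key
    exact PySem.Dict.nodup_keys_empty
  exact PySem.Dict.getD_of_mem_items _ hmem hndk 0

-- sorted2 with first key fst produces a fst-nondecreasing list.
theorem insertBy_pairwise_fst (x : Int × Int) (ys : List (Int × Int))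
    (h : ys.Pairwise (fun a b => a.1 ≤ b.1)) :
    (PySem.List.insertBy
        (fun a b => decide (a.1 < b.1) || !decide (b.1 < a.1) && decide (a.2 < b.2)) x ys).Pairwise
      (fun a b => a.1 ≤ b.1) := by
  induction ys with
  | nil => simp [PySem.List.insertBy]
  | cons y ys ih =>
    rw [List.pairwise_cons] at h
    show (if (decide (x.1 < y.1) || !decide (y.1 < x.1) && decide (x.2 < y.2)) = true
        then x :: y :: ys
        else y :: PySem.List.insertBy _ x ys).Pairwise _
    split_ifs with hb
    · refine List.Pairwise.cons ?_ (List.Pairwise.cons h.1 h.2)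
      intro z hz
      have hxy : x.1 ≤ y.1 := by
        rcases Bool.or_eq_true_iff.mp hb with h1 | h2
        · simpa using le_of_lt (of_decide_eq_true h1)
        · have := (Bool.and_eq_true_iff.mp h2).1
          simp at this
          omega
      rcases List.mem_cons.mp hz with rfl | hz
      · exact hxy
      · exact le_trans hxy (h.1 z hz)
    · have hnb : ¬ x.1 < y.1 := fun hc => hb (by simp [hc])
      refine List.Pairwise.cons ?_ (ih h.2)
      intro z hz
      rcases (PySem.List.mem_insertBy _ _ _ _).mp hz with rfl | hz
      · omega
      · exact h.1 z hz

theorem foldl_insertBy_pairwise_fst (l acc : List (Int × Int))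
    (h : acc.Pairwise (fun a b => a.1 ≤ b.1)) :
    (l.foldl (fun acc x => PySem.List.insertBy
        (fun a b => decide (a.1 < b.1) || !decide (b.1 < a.1) && decide (a.2 < b.2)) x acc) acc).Pairwise
      (fun a b => a.1 ≤ b.1) := by
  induction l generalizing acc with
  | nil => simpa using h
  | cons x l ih =>
    simp only [List.foldl_cons]
    exact ih _ (insertBy_pairwise_fst x acc h)

theorem sorted2_pairwise_fst (xs : List (Int × Int)) :
    (PySem.List.sorted2 xs Prod.fst Prod.snd).Pairwise (fun a b => a.1 ≤ b.1) :=
  foldl_insertBy_pairwise_fst xs [] (by simp)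

theorem main_eq (galaxies : List (Int × Int)) (hne : galaxies ≠ []) :
    add_cols galaxies = add_cols_alt galaxies := by
  unfold add_cols add_cols_alt
  set gs := PySem.List.sorted2 galaxies Prod.fst Prod.snd with hgsdef
  have hperm := PySem.List.sorted2_perm galaxies Prod.fst Prod.snd false
  have hperm' : gs.Perm galaxies := hperm
  have hgs_ne : gs ≠ [] := by
    intro h
    rw [h] at hperm'
    exact hne hperm'.nil_eq.symm
  rw [if_neg hgs_ne]
  obtain ⟨m, rest, hms⟩ := List.exists_cons_of_ne_nil hgs_ne
  have hpw : gs.Pairwise (fun a b => a.1 ≤ b.1) := sorted2_pairwise_fst galaxies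
  -- the column list and its properties
  set cols := PySem.List.sorted (PySem.Set.ofList (gs.map Prod.fst)) (fun x => x) with hcols
  have hcols_lt : cols.Pairwise (· < ·) := PySem.List.sorted_ofList_pairwise_lt _
  have hcols_mem : ∀ c : Int, c ∈ cols ↔ c ∈ gs.map Prod.fst := by
    intro c
    rw [hcols, PySem.List.mem_sorted, PySem.Set.mem_ofList]
  have hm_le : ∀ x ∈ gs, m.1 ≤ x.1 := by
    intro x hx
    rw [hms] at hpw hx
    rcases List.mem_cons.mp hx with rfl | hx
    · exact le_refl _
    · exact (List.pairwise_cons.mp hpw).1 x hx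
  have hm_le_cols : ∀ c ∈ cols, m.1 ≤ c := by
    intro c hc
    rw [hcols_mem, List.mem_map] at hc
    obtain ⟨p, hp, rfl⟩ := hc
    exact hm_le p hp
  have hm_mem_cols : m.1 ∈ cols := by
    rw [hcols_mem, List.mem_map]
    exact ⟨m, by rw [hms]; simp, rfl⟩
  -- head of cols is m.1, and pyGetD reads it
  have hcols_ne : cols ≠ [] := by
    intro h
    rw [h] at hm_mem_cols
    simp at hm_mem_cols
  obtain ⟨c, cr, hcc⟩ := List.exists_cons_of_ne_nil hcols_ne
  have hc_eq : c = m.1 := by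
    rcases List.mem_cons.mp (hcc ▸ hm_mem_cols) with he | hm
    · omega
    · have h1 : c < m.1 := (List.pairwise_cons.mp (hcc ▸ hcols_lt)).1 _ hm
      have h2 : m.1 ≤ c := hm_le_cols c (by rw [hcc]; simp)
      omega
  have hgetD : PySem.List.pyGetD cols 0 0 = m.1 := by
    rw [hcc, hc_eq]
    exact PySem.List.pyGetD_natCast (m.1 :: cr) 0 0
  -- Dlt over the raw columns equals countP over cols
  have hDlt : ∀ d : Int, Dlt (gs.map Prod.fst) d = ((cols.countP (fun x => decide (x < d)) : Int)) := by
    intro d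
    unfold Dlt
    rw [PySem.List.dedup_eq_ofList]
    rw [(PySem.List.sorted_perm (PySem.Set.ofList (gs.map Prod.fst)) (fun x => x) false).countP_eq]
  -- both sides as maps over gs
  rw [hms, loop_closed rest m 0 (hms ▸ hpw), ← hms]
  apply List.map_congr_left
  intro x hx
  have hx_cols : x.1 ∈ cols := by
    rw [hcols_mem, List.mem_map]; exact ⟨x, hx, rfl⟩
  have hrank := rank_getD cols hcols_lt x.1 hx_cols
  have hD := hDlt x.1
  rw [hD, hgetD, hrank]
  refine Prod.ext ?_ rfl
  simp only
  omega

-- ===== VERDICT (by name: the statement is the Claim_ definition above) =====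
theorem add_cols_spec : Claim_equal_add_cols := by
  intro galaxies _ hne
  unfold Spec_add_cols
  exact main_eq galaxies hne
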